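-- pv_equiv track=rewrite | github.com/NaolJK/Leetcode | 1233-remove-sub-folders-from-the-filesystem/1233-remove-sub-folders-from-the-filesystem.py | removeSubfolders
-- ===== SOURCE A (Python) =====
-- from typing import List
--
-- def removeSubfolders(folder: List[str]) -> List[str]:
--
--     folder.sort(key=lambda x: len(x))
--
--     seen = set()
--
--     final = []
--
--     for x in folder:
--
--         for i in range(2, len(x.split('/'))):
--
--             if tuple(x.split('/')[1:i]) in seen:
--
--                 break
--         else:
--
--             final.append(x)
--
--             seen.add(tuple(x.split('/')[1:]))
--
--     return final
-- ===== SOURCE B (Python) =====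
-- from typing import List
--
-- def removeSubfolders(folder: List[str]) -> List[str]:
--     # Pairwise decision: a path is dropped iff some EARLIER path (in the length-stable
--     # sorted order) has a component tuple that is a nonempty strict prefix of its own —
--     # no mutable 'seen' set of kept folders is maintained at all.
--     folder.sort(key=len)
--     tups = [tuple(x.split('/')[1:]) for x in folder]
--     final = []
--     for p, x in enumerate(folder):
--         t = tups[p]
--         if not any(u and len(u) < len(t) and t[:len(u)] == u for u in tups[:p]):
--             final.append(x)
--     return final
-- ===== Notes on version B (the rewrite author's own statement) =====
-- stated objective: alternative
-- what changed: A greedily maintains a mutable 'seen' set of the component tuples of KEPT folders and breaks out of a re-splitting prefix loop; B keeps no such state: after one split per path it decides each path by a stateless pairwise test ('is any earlier path's component tuple a nonempty strict prefix of mine?'), correct because the earliest prefix-provider is itself never blocked.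
import Mathlib
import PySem

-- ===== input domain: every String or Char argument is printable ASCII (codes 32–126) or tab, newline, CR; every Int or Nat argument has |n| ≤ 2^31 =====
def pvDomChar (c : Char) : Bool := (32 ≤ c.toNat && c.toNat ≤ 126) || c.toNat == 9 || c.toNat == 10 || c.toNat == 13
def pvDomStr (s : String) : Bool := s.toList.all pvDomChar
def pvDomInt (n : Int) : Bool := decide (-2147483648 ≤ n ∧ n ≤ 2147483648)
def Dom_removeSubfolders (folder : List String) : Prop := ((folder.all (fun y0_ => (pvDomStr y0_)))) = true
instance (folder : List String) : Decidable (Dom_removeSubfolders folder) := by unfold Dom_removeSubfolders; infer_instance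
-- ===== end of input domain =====

-- B replaces A's greedy mutable seen-set of kept folders by a stateless pairwise test
-- against ALL earlier folders (objective: alternative algorithm, same result).
-- Both A and B sort the argument list in place in Python; the equivalence proved here is
-- about the return value.

-- shared primitive shim: s.split(sep) for the nonempty literal sep "/" (split? is some there)
def pySplit (x : String) (sep : String) : List String := (PySem.Str.split? x sep).getD []

-- ===== PORT A =====
-- inner loop: 'for i in range(2, len(x.split('/'))): if tuple(x.split('/')[1:i]) in seen: break'
-- returns true iff the loop broke
def removeSubfoldersBreak (is : List Int) (x : String) (seen : PySem.Set (List String)) : Bool :=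
  match is with
  | [] => false
  | i :: rest =>
      if PySem.Set.contains seen (PySem.List.slice (pySplit x "/") (some 1) (some i)) then
        true
      else removeSubfoldersBreak rest x seen

-- outer 'for x in folder' with state (seen, final); the for-else appends when no break occurred
def removeSubfoldersLoop (xs : List String) (seen : PySem.Set (List String))
    (final : List String) : List String :=
  match xs with
  | [] => final
  | x :: rest =>
      if removeSubfoldersBreak
          (PySem.List.pyRange 2 ((pySplit x "/").length : Int) 1) x seen then
        removeSubfoldersLoop rest seen final
      else
        removeSubfoldersLoop rest
          (PySem.Set.add seen (PySem.List.slice (pySplit x "/") (some 1) none))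
          (final ++ [x])

def removeSubfolders (folder : List String) : List String :=
  removeSubfoldersLoop (PySem.List.sorted folder (fun x => PySem.Str.len x) false)
    PySem.Set.empty []

-- ===== PORT B =====
-- tuple(x.split('/')[1:])
def tupOf (x : String) : List String := PySem.List.slice (pySplit x "/") (some 1) none

-- 'any(u and len(u) < len(t) and t[:len(u)] == u for u in tups[:p])'
def altBlocked (t : List String) (prevs : List (List String)) : Bool :=
  prevs.any (fun u =>
    !u.isEmpty && decide (u.length < t.length)
      && (PySem.List.slice t none (some (u.length : Int)) == u))

-- 'for p, x in enumerate(folder): …' with tups[:p] accumulated in prev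
def altLoop (xs : List (String × List String)) (prev : List (List String))
    (final : List String) : List String :=
  match xs with
  | [] => final
  | (x, t) :: rest =>
      if altBlocked t prev then altLoop rest (prev ++ [t]) final
      else altLoop rest (prev ++ [t]) (final ++ [x])

def removeSubfolders_alt (folder : List String) : List String :=
  let srt := PySem.List.sorted folder (fun x => PySem.Str.len x) false
  let tups := srt.map tupOf
  altLoop (srt.zip tups) [] []

-- ===== PRECONDITION & SPEC =====
def Spec_removeSubfolders (folder : List String) (out : List String) : Prop := out = removeSubfolders_alt folder
instance (folder : List String) (out : List String) : Decidable (Spec_removeSubfolders folder out) := by unfold Spec_removeSubfolders; infer_instance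

-- ===== CLAIM (what is proved, stated in full; the proofs are below) =====
def Claim_equal_removeSubfolders : Prop := ∀ (folder : List String), Dom_removeSubfolders folder → Spec_removeSubfolders folder (removeSubfolders folder)

-- ===== LEMMAS AND PROOFS =====

-- u is a nonempty strict component-prefix of t
def Pref (u t : List String) : Prop := u ≠ [] ∧ u.length < t.length ∧ t.take u.length = u

lemma Pref_trans {v u t : List String} (h1 : Pref v u) (h2 : Pref u t) : Pref v t := by
  obtain ⟨hv, hvu, hvt⟩ := h1
  obtain ⟨hu, hut, hta⟩ := h2
  refine ⟨hv, by omega, ?_⟩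
  have : (t.take u.length).take v.length = t.take v.length := by
    rw [List.take_take]; congr 1; omega
  rw [← this, hta, hvt]

-- B's inner 'any' as an existential
lemma altBlocked_iff (t : List String) (prevs : List (List String)) :
    altBlocked t prevs = true ↔ ∃ u ∈ prevs, Pref u t := by
  unfold altBlocked
  rw [List.any_eq_true]
  apply exists_congr; intro u
  simp only [PySem.List.slice_to_natCast, Bool.and_eq_true, Bool.not_eq_eq_eq_not,
    Bool.not_true, List.isEmpty_eq_false_iff, decide_eq_true_eq, beq_iff_eq, Pref]
  tauto

-- A's break loop is an 'any' over the range
lemma break_eq_any (is : List Int) (x : String) (seen : PySem.Set (List String)) :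
    removeSubfoldersBreak is x seen
      = is.any (fun i => PySem.Set.contains seen (PySem.List.slice (pySplit x "/") (some 1) (some i))) := by
  induction is with
  | nil => rfl
  | cons i rest ih =>
      simp only [removeSubfoldersBreak, List.any_cons]
      split_ifs with h
      · rw [h, Bool.true_or]
      · simp only [Bool.not_eq_true] at h
        rw [h, Bool.false_or]; exact ih

-- A's break condition as an existential over seen
lemma break_iff (x : String) (seen : PySem.Set (List String)) :
    removeSubfoldersBreak (PySem.List.pyRange 2 ((pySplit x "/").length : Int) 1) x seen = true
      ↔ ∃ u, PySem.Set.contains seen u = true ∧ Pref u (tupOf x) := by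
  rw [break_eq_any, List.any_eq_true]
  have htup : tupOf x = (pySplit x "/").drop 1 := by
    unfold tupOf; rw [PySem.List.slice_from_one, List.drop_one]
  constructor
  · rintro ⟨i, hmem, hc⟩
    rw [PySem.List.mem_pyRange_one] at hmem
    obtain ⟨h2, hlt⟩ := hmem
    have hplen : 3 ≤ (pySplit x "/").length := by omega
    have hi : i = ((i.toNat : Nat) : Int) := by omega
    refine ⟨PySem.List.slice (pySplit x "/") (some 1) (some i), hc, ?_, ?_, ?_⟩
    · rw [hi, (by norm_num : (1:Int) = ((1:Nat):Int)), PySem.List.slice_natCast]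
      have : (pySplit x "/").drop 1 ≠ [] := by
        rw [← List.length_pos_iff, List.length_drop]; omega
      intro hnil
      apply this
      have : (((pySplit x "/").drop 1).take (i.toNat - 1)).length = 0 := by rw [hnil]; rfl
      simp only [List.length_take, List.length_drop] at this
      rw [← List.length_eq_zero_iff]
      simp only [List.length_drop]
      omega
    · rw [hi, (by norm_num : (1:Int) = ((1:Nat):Int)), PySem.List.slice_natCast, htup]
      simp only [List.length_take, List.length_drop]
      omega
    · rw [hi, (by norm_num : (1:Int) = ((1:Nat):Int)), PySem.List.slice_natCast, htup]
      simp only [List.length_take, List.length_drop]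
      congr 1
      omega
  · rintro ⟨u, hc, hne, hlt, htake⟩
    rw [htup] at hlt htake
    have hdlen : ((pySplit x "/").drop 1).length = (pySplit x "/").length - 1 := by
      simp
    have hplen : u.length + 1 < (pySplit x "/").length := by omega
    have hul : 1 ≤ u.length := by
      rcases u with _ | _ <;> simp_all
    refine ⟨(u.length : Int) + 1, ?_, ?_⟩
    · rw [PySem.List.mem_pyRange_one]
      constructor
      · omega
      · omega
    · have : ((u.length : Int) + 1) = (((u.length + 1 : Nat)) : Int) := by push_cast; ring
      rw [this, (by norm_num : (1:Int) = ((1:Nat):Int)), PySem.List.slice_natCast]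
      have h1 : u.length + 1 - 1 = u.length := by omega
      rw [h1, htake]
      exact hc

-- the relation between A's seen-set and B's list of all processed tuples
def SeenInv (prev : List (List String)) (seen : PySem.Set (List String)) : Prop :=
  (∀ u, PySem.Set.contains seen u = true → u ∈ prev) ∧
  (∀ u ∈ prev, PySem.Set.contains seen u = true ∨
      ∃ v, PySem.Set.contains seen v = true ∧ Pref v u)

-- under the invariant, A's break test and B's pairwise test agree
lemma blocked_eq (x : String) (prev : List (List String)) (seen : PySem.Set (List String))
    (hinv : SeenInv prev seen) :
    removeSubfoldersBreak (PySem.List.pyRange 2 ((pySplit x "/").length : Int) 1) x seen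
      = altBlocked (tupOf x) prev := by
  rw [Bool.eq_iff_iff, break_iff, altBlocked_iff]
  constructor
  · rintro ⟨u, hc, hp⟩
    exact ⟨u, hinv.1 u hc, hp⟩
  · rintro ⟨u, hu, hp⟩
    rcases hinv.2 u hu with hc | ⟨v, hvc, hvp⟩
    · exact ⟨u, hc, hp⟩
    · exact ⟨v, hvc, Pref_trans hvp hp⟩

lemma contains_add_iff {u t : List String} (s : PySem.Set (List String)) :
    PySem.Set.contains (PySem.Set.add s t) u = true ↔ u ∈ s ∨ u = t := by
  rw [PySem.Set.contains_iff, PySem.Set.mem_add]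

-- outer loops agree on every pair of states related by the invariant
lemma loop_eq (xs : List String) :
    ∀ (seen : PySem.Set (List String)) (prev : List (List String)) (final : List String),
      SeenInv prev seen →
      removeSubfoldersLoop xs seen final = altLoop (xs.zip (xs.map tupOf)) prev final := by
  induction xs with
  | nil => intro seen prev final _; rfl
  | cons x rest ih =>
    intro seen prev final hinv
    simp only [List.map_cons, List.zip_cons_cons, removeSubfoldersLoop, altLoop,
      blocked_eq x prev seen hinv]
    by_cases hb : altBlocked (tupOf x) prev = true
    · rw [if_pos hb, if_pos hb]
      apply ih
      refine ⟨fun u hc => List.mem_append_left _ (hinv.1 u hc), fun u hu => ?_⟩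
      rcases List.mem_append.mp hu with h | h
      · exact hinv.2 u h
      · have hut : u = tupOf x := by simpa using h
        subst hut
        rw [altBlocked_iff] at hb
        obtain ⟨v, hv, hp⟩ := hb
        rcases hinv.2 v hv with hc | ⟨w, hwc, hwp⟩
        · exact Or.inr ⟨v, hc, hp⟩
        · exact Or.inr ⟨w, hwc, Pref_trans hwp hp⟩
    · rw [if_neg hb, if_neg hb]
      have htup : PySem.List.slice (pySplit x "/") (some 1) none = tupOf x := rfl
      rw [htup]
      apply ih
      constructor
      · intro u hc
        rcases (contains_add_iff seen).mp hc with h | h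
        · exact List.mem_append_left _ (hinv.1 u ((PySem.Set.contains_iff _ _).mpr h))
        · exact List.mem_append_right _ (by simp [h])
      · intro u hu
        rcases List.mem_append.mp hu with h | h
        · rcases hinv.2 u h with hc | ⟨v, hvc, hvp⟩
          · exact Or.inl ((contains_add_iff seen).mpr (Or.inl ((PySem.Set.contains_iff _ _).mp hc)))
          · exact Or.inr ⟨v, (contains_add_iff seen).mpr (Or.inl ((PySem.Set.contains_iff _ _).mp hvc)), hvp⟩
        · have hut : u = tupOf x := by simpa using h
          subst hut
          exact Or.inl ((contains_add_iff seen).mpr (Or.inr rfl))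

-- ===== VERDICT (by name: the statement is the Claim_ definition above) =====
theorem removeSubfolders_spec : Claim_equal_removeSubfolders := by
  intro folder _
  unfold Spec_removeSubfolders removeSubfolders removeSubfolders_alt
  apply loop_eq
  exact ⟨fun u hc => by simp [PySem.Set.empty] at hc, fun u hu => by simp at hu⟩
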